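-- pv_equiv track=rewrite | github.com/ShyrTheFirst/Python-Projetos-e-Arquivos | pygame/Inacabados/clicker game/dividir_linhas.py | dividir_linhas
-- ===== SOURCE A (Python) =====
-- def dividir_linhas(frase):
--     frase_split = frase.split()
--     frase_junta = []
--     palavra_junta = ''
--     palavra_junta2 = ''
--     if len(frase_split) == 6:
--         for palavra in range(0,len(frase_split)):
--             if palavra == 0:
--                 frase_junta.append(frase_split[palavra])
--             if palavra == 1:
--                 frase_junta.append(frase_split[palavra])
--             if palavra == 2:
--                 palavra_junta += frase_split[palavra]
--             if palavra == 3: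
--                 palavra_junta += ' ' + frase_split[palavra]
--                 frase_junta.append(palavra_junta)
--             if palavra == 4:
--                 palavra_junta2 += frase_split[palavra]
--             if palavra == 5:
--                 palavra_junta2 += ' ' + frase_split[palavra]
--                 frase_junta.append(palavra_junta2)
--
--     if len(frase_split) == 5:
--         for palavra in range(0,len(frase_split)):
--             if palavra == 0:
--                 frase_junta.append(frase_split[palavra])
--             if palavra == 1:
--                 frase_junta.append(frase_split[palavra])
--             if palavra == 2:
--                 palavra_junta += frase_split[palavra]
--             if palavra == 3:
--                 palavra_junta += ' ' + frase_split[palavra]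
--                 frase_junta.append(palavra_junta)
--             if palavra == 4:
--                 palavra_junta2 += frase_split[palavra]
--                 frase_junta.append(palavra_junta2)
--
--     if len(frase_split) == 4:
--         for palavra in range(0,len(frase_split)):
--             if palavra == 0:
--                 frase_junta.append(frase_split[palavra])
--             if palavra == 1:
--                 frase_junta.append(frase_split[palavra])
--             if palavra == 2:
--                 palavra_junta += frase_split[palavra]
--             if palavra == 3:
--                 palavra_junta += ' ' + frase_split[palavra]
--                 frase_junta.append(palavra_junta)
--
--     if len(frase_split) == 3:
--         for palavra in range(0,len(frase_split)):
--             if palavra == 0: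
--                 frase_junta.append(frase_split[palavra])
--             if palavra == 1:
--                 frase_junta.append(frase_split[palavra])
--             if palavra == 2:
--                 palavra_junta += frase_split[palavra]
--                 frase_junta.append(palavra_junta)
--
--     if len(frase_split) == 2:
--         for palavra in range(0,len(frase_split)):
--             if palavra == 0:
--                 frase_junta.append(frase_split[palavra])
--             if palavra == 1:
--                 frase_junta.append(frase_split[palavra])
--
--
--
--     frase_final = frase_junta
--     return frase_final
-- ===== SOURCE B (Python) =====
-- def dividir_linhas(frase):
--     words = frase.split()
--     n = len(words)
--     if not (2 <= n <= 6):
--         return []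
--     return words[:2] + [' '.join(words[i:i+2]) for i in range(2, n, 2)]
-- ===== Notes on version B (the rewrite author's own statement) =====
-- stated objective: simpler
-- what changed: Replaces A's five length-specific loops of index-equality branches with a single guard (2<=n<=6), a slice for the first two words and one pairing comprehension joining words two at a time, covering all lengths uniformly.
import Mathlib
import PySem

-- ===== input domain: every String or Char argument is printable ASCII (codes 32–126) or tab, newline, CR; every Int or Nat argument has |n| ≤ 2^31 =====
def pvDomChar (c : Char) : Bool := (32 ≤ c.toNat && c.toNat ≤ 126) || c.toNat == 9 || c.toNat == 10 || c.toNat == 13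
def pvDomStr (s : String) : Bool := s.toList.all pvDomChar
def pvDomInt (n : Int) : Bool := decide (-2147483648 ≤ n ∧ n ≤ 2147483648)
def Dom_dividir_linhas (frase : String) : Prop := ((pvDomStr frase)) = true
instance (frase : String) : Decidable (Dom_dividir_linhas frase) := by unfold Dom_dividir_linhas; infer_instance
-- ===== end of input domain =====

-- B replaces A's five length-specific index-branch loops with one guard, one slice and one
-- pairing comprehension (objective: simpler).

-- ===== PORT A =====
-- state = (frase_junta, palavra_junta, palavra_junta2)
def dividir_linhas (frase : String) : List String :=
  let frase_split := PySem.Str.split₀ frase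
  let st0 : List String × String × String := ([], "", "")
  let st1 :=
    if frase_split.length = 6 then
      (PySem.List.pyRange 0 (frase_split.length : Int) 1).foldl (fun st palavra =>
        let st := if palavra = 0 then (st.1 ++ [PySem.List.pyGetD frase_split palavra ""], st.2.1, st.2.2) else st
        let st := if palavra = 1 then (st.1 ++ [PySem.List.pyGetD frase_split palavra ""], st.2.1, st.2.2) else st
        let st := if palavra = 2 then (st.1, st.2.1 ++ PySem.List.pyGetD frase_split palavra "", st.2.2) else st
        let st := if palavra = 3 then
            let pj := st.2.1 ++ " " ++ PySem.List.pyGetD frase_split palavra ""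
            (st.1 ++ [pj], pj, st.2.2)
          else st
        let st := if palavra = 4 then (st.1, st.2.1, st.2.2 ++ PySem.List.pyGetD frase_split palavra "") else st
        let st := if palavra = 5 then
            let pj2 := st.2.2 ++ " " ++ PySem.List.pyGetD frase_split palavra ""
            (st.1 ++ [pj2], st.2.1, pj2)
          else st
        st) st0
    else st0
  let st2 :=
    if frase_split.length = 5 then
      (PySem.List.pyRange 0 (frase_split.length : Int) 1).foldl (fun st palavra =>
        let st := if palavra = 0 then (st.1 ++ [PySem.List.pyGetD frase_split palavra ""], st.2.1, st.2.2) else st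
        let st := if palavra = 1 then (st.1 ++ [PySem.List.pyGetD frase_split palavra ""], st.2.1, st.2.2) else st
        let st := if palavra = 2 then (st.1, st.2.1 ++ PySem.List.pyGetD frase_split palavra "", st.2.2) else st
        let st := if palavra = 3 then
            let pj := st.2.1 ++ " " ++ PySem.List.pyGetD frase_split palavra ""
            (st.1 ++ [pj], pj, st.2.2)
          else st
        let st := if palavra = 4 then
            let pj2 := st.2.2 ++ PySem.List.pyGetD frase_split palavra ""
            (st.1 ++ [pj2], st.2.1, pj2)
          else st
        st) st1
    else st1
  let st3 :=
    if frase_split.length = 4 then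
      (PySem.List.pyRange 0 (frase_split.length : Int) 1).foldl (fun st palavra =>
        let st := if palavra = 0 then (st.1 ++ [PySem.List.pyGetD frase_split palavra ""], st.2.1, st.2.2) else st
        let st := if palavra = 1 then (st.1 ++ [PySem.List.pyGetD frase_split palavra ""], st.2.1, st.2.2) else st
        let st := if palavra = 2 then (st.1, st.2.1 ++ PySem.List.pyGetD frase_split palavra "", st.2.2) else st
        let st := if palavra = 3 then
            let pj := st.2.1 ++ " " ++ PySem.List.pyGetD frase_split palavra ""
            (st.1 ++ [pj], pj, st.2.2)
          else st
        st) st2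
    else st2
  let st4 :=
    if frase_split.length = 3 then
      (PySem.List.pyRange 0 (frase_split.length : Int) 1).foldl (fun st palavra =>
        let st := if palavra = 0 then (st.1 ++ [PySem.List.pyGetD frase_split palavra ""], st.2.1, st.2.2) else st
        let st := if palavra = 1 then (st.1 ++ [PySem.List.pyGetD frase_split palavra ""], st.2.1, st.2.2) else st
        let st := if palavra = 2 then
            let pj := st.2.1 ++ PySem.List.pyGetD frase_split palavra ""
            (st.1 ++ [pj], pj, st.2.2)
          else st
        st) st3
    else st3
  let st5 :=
    if frase_split.length = 2 then
      (PySem.List.pyRange 0 (frase_split.length : Int) 1).foldl (fun st palavra =>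
        let st := if palavra = 0 then (st.1 ++ [PySem.List.pyGetD frase_split palavra ""], st.2.1, st.2.2) else st
        let st := if palavra = 1 then (st.1 ++ [PySem.List.pyGetD frase_split palavra ""], st.2.1, st.2.2) else st
        st) st4
    else st4
  st5.1

-- ===== PORT B =====
def dividir_linhas_alt (frase : String) : List String :=
  let words := PySem.Str.split₀ frase
  let n := words.length
  if 2 ≤ n ∧ n ≤ 6 then
    PySem.List.slice words none (some 2) ++
      (PySem.List.pyRange 2 (n : Int) 2).map
        (fun i => PySem.Str.join " " (PySem.List.slice words (some i) (some (i + 2))))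
  else []

-- ===== PRECONDITION & SPEC =====
def Spec_dividir_linhas (frase : String) (out : List String) : Prop := out = dividir_linhas_alt frase
instance (frase : String) (out : List String) : Decidable (Spec_dividir_linhas frase out) := by unfold Spec_dividir_linhas; infer_instance

-- ===== CLAIM (what is proved, stated in full; the proofs are below) =====
def Claim_equal_dividir_linhas : Prop := ∀ (frase : String), Dom_dividir_linhas frase → Spec_dividir_linhas frase (dividir_linhas frase)

-- ===== LEMMAS AND PROOFS =====
theorem join1 (x : String) : PySem.Str.join " " [x] = x := by
  apply String.toList_injective
  simp [PySem.Str.toList_join, PySem.Chars.join_singleton]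

theorem join2 (x y : String) : PySem.Str.join " " [x, y] = x ++ " " ++ y := by
  apply String.toList_injective
  simp [PySem.Str.toList_join, PySem.Chars.join_cons_cons, PySem.Chars.join_singleton]

theorem sliceTo2 {α : Type} (xs : List α) : PySem.List.slice xs none (some 2) = xs.take 2 := by
  rw [PySem.List.slice_to _ (by norm_num)]; rfl

theorem slice24 {α : Type} (xs : List α) : PySem.List.slice xs (some 2) (some 4) = (xs.drop 2).take 2 := by
  rw [PySem.List.slice_toNat _ (by norm_num) (by norm_num)]; rfl

theorem slice46 {α : Type} (xs : List α) : PySem.List.slice xs (some 4) (some 6) = (xs.drop 4).take 2 := by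
  rw [PySem.List.slice_toNat _ (by norm_num) (by norm_num)]; rfl

-- ===== VERDICT (by name: the statement is the Claim_ definition above) =====
theorem dividir_linhas_spec : Claim_equal_dividir_linhas := by
  intro frase _
  unfold Spec_dividir_linhas dividir_linhas dividir_linhas_alt
  generalize PySem.Str.split₀ frase = ws
  rcases ws with _|⟨a,_|⟨b,_|⟨c,_|⟨d,_|⟨e,_|⟨f,_|⟨g,t⟩⟩⟩⟩⟩⟩⟩
  · simp
  · simp
  · simp [PySem.List.pyGetD_ofNat', sliceTo2,
      show PySem.List.pyRange 0 2 1 = [0,1] from by decide,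
      show PySem.List.pyRange 2 2 2 = [] from by decide]
  · simp [PySem.List.pyGetD_ofNat', sliceTo2, slice24, join1,
      show PySem.List.pyRange 0 3 1 = [0,1,2] from by decide,
      show PySem.List.pyRange 2 3 2 = [2] from by decide]
  · simp [PySem.List.pyGetD_ofNat', sliceTo2, slice24, join2,
      show PySem.List.pyRange 0 4 1 = [0,1,2,3] from by decide,
      show PySem.List.pyRange 2 4 2 = [2] from by decide]
  · simp [PySem.List.pyGetD_ofNat', sliceTo2, slice24, slice46, join1, join2,
      show PySem.List.pyRange 0 5 1 = [0,1,2,3,4] from by decide,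
      show PySem.List.pyRange 2 5 2 = [2,4] from by decide]
  · simp [PySem.List.pyGetD_ofNat', sliceTo2, slice24, slice46, join2,
      show PySem.List.pyRange 0 6 1 = [0,1,2,3,4,5] from by decide,
      show PySem.List.pyRange 2 6 2 = [2,4] from by decide]
  · simp
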